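-- pv_equiv track=rewrite | github.com/MrBrantCode/unitest_baseline | mut_generate/mist_train_taco/taco_8810/solution.py | find_position_in_series
-- ===== SOURCE A (Python) =====
-- def find_position_in_series(n: str) -> int:
--     cnt = [0] * 51
--     for i in range(1, 51):
--         cnt[i] = 2 ** i
--     total = cnt.copy()
--     for i in range(1, 51):
--         total[i] += total[i - 1]
--     sz = len(n)
--     ans = total[sz - 1]
--     for i in range(sz - 1):
--         if n[i] == '7':
--             ans += cnt[sz - 1 - i]
--     ans += 1 if n[-1] == '4' else 2
--     return ans
-- ===== SOURCE B (Python) =====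
-- def find_position_in_series(n: str) -> int:
--     v = 0
--     for c in n[:-1]:
--         v = 2 * v + (1 if c == '7' else 0)
--     v = 2 * v + (0 if n[-1] == '4' else 1)
--     return (1 << len(n)) - 1 + v
-- ===== Notes on version B (the rewrite author's own statement) =====
-- stated objective: simpler
-- what changed: Both 51-entry power/prefix-sum tables are dropped: B computes the count of shorter lucky numbers as the closed form (1<<len(n))-1 and the within-length rank by a single Horner scan over the digits (non-last digits tested =='7', the last tested !='4', exactly as A).
import Mathlib
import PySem

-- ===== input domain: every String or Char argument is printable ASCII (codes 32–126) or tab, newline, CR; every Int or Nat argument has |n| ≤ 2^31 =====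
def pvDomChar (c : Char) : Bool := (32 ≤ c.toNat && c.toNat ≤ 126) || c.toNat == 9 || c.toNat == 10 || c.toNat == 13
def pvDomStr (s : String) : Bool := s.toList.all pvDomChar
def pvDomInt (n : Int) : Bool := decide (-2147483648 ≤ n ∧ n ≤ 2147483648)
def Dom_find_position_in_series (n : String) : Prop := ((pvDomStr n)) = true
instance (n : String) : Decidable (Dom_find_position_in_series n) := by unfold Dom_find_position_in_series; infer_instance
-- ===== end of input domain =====

-- B replaces A's two 51-entry tables by the closed form 2^len-1 plus a Horner scan of the digits (objective: simpler).

-- ===== PORT A =====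
-- A-side helpers: the two tables A builds (they do not depend on n)
def pvCnt : List Int :=
  (PySem.List.pyRange 1 51 1).foldl (fun c i => c.set i.toNat ((2:Int) ^ i.toNat)) (List.replicate 51 0)

def pvTotal : List Int :=
  (PySem.List.pyRange 1 51 1).foldl (fun t i => t.set i.toNat (t.getD i.toNat 0 + t.getD (i - 1).toNat 0)) pvCnt

def find_position_in_series (n : String) : Int :=
  let sz : Int := PySem.Str.len n
  let ans : Int := (PySem.List.pyGet? pvTotal (sz - 1)).getD 0   -- total[sz-1]; negative index wraps, out of range = IndexError (outside Pre_)
  let ans : Int := (PySem.List.pyRange 0 (sz - 1) 1).foldl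
    (fun a i => if PySem.Str.pyGet? n i = some '7' then a + (PySem.List.pyGet? pvCnt (sz - 1 - i)).getD 0 else a) ans
  ans + (if PySem.Str.pyGet? n (-1) = some '4' then 1 else 2)    -- n[-1]; none = IndexError on the empty string (outside Pre_)

-- ===== PORT B =====
def find_position_in_series_alt (n : String) : Int :=
  let v : Int := (n.toList.dropLast).foldl (fun v c => 2 * v + (if c = '7' then 1 else 0)) 0
  let v : Int := 2 * v + (if PySem.Str.pyGet? n (-1) = some '4' then 0 else 1)
  (2:Int) ^ n.toList.length - 1 + v

-- ===== PRECONDITION & SPEC =====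
-- A raises IndexError on the empty string (n[-1]) and on strings longer than 51 (total[sz-1] past the fixed table).
def Pre_find_position_in_series (n : String) : Prop := 1 ≤ n.toList.length ∧ n.toList.length ≤ 51
instance (n : String) : Decidable (Pre_find_position_in_series n) := by unfold Pre_find_position_in_series; infer_instance
def pvWitness_find_position_in_series : String := "47"

def Spec_find_position_in_series (n : String) (out : Int) : Prop := out = find_position_in_series_alt n
instance (n : String) (out : Int) : Decidable (Spec_find_position_in_series n out) := by unfold Spec_find_position_in_series; infer_instance

-- ===== CLAIM (what is proved, stated in full; the proofs are below) =====
def Claim_equal_find_position_in_series : Prop := ∀ (n : String), Dom_find_position_in_series n → Pre_find_position_in_series n → Spec_find_position_in_series n (find_position_in_series n)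

-- ===== LEMMAS AND PROOFS =====

-- the two tables, evaluated
lemma pvCnt_eval : pvCnt = (List.range 51).map (fun k => if k = 0 then (0:Int) else 2 ^ k) := by decide
lemma pvTotal_eval : pvTotal = (List.range 51).map (fun k => (2:Int) ^ (k + 1) - 2) := by decide

-- the Horner fold of B, with its accumulator shifted out
lemma horner_shift (l : List Char) : ∀ (a : Int),
    l.foldl (fun v c => 2 * v + (if c = '7' then 1 else 0)) a
      = a * 2 ^ l.length + l.foldl (fun v c => 2 * v + (if c = '7' then 1 else 0)) 0 := by
  induction l with
  | nil => intro a; simp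
  | cons c t ih =>
      intro a
      simp only [List.foldl_cons, List.length_cons]
      rw [ih (2 * a + _), ih (2 * 0 + _)]
      ring

-- A's index loop equals twice B's Horner fold
lemma loopA (l : List Char) : ∀ (a : Int),
    (List.range l.length).foldl
        (fun a k => if l[k]? = some '7' then a + 2 ^ (l.length - k) else a) a
      = a + 2 * l.foldl (fun v c => 2 * v + (if c = '7' then 1 else 0)) 0 := by
  induction l with
  | nil => intro a; simp
  | cons c t ih =>
      intro a
      rw [List.length_cons, List.range_succ_eq_map, List.foldl_cons, List.foldl_map]
      have hbody : (fun (a : Int) (k : Nat) =>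
          if (c :: t)[k + 1]? = some '7' then a + 2 ^ (t.length + 1 - (k + 1)) else a)
          = fun (a : Int) (k : Nat) => if t[k]? = some '7' then a + 2 ^ (t.length - k) else a := by
        funext a k
        simp [Nat.succ_sub_succ]
      simp only [Nat.succ_eq_add_one, hbody]
      rw [ih]
      rw [List.foldl_cons, horner_shift t (2 * 0 + _)]
      simp only [List.getElem?_cons_zero, Option.some.injEq]
      by_cases hc : c = '7' <;> simp [hc] <;> ring

theorem find_position_in_series_spec_aux (n : String)
    (h1 : 1 ≤ n.toList.length) (h2 : n.toList.length ≤ 51) :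
    find_position_in_series n = find_position_in_series_alt n := by
  have hlen : PySem.Str.len n = (n.toList.length : Int) := PySem.Str.len_eq n
  have hidx : ((n.toList.length : Int) - 1) = ((n.toList.length - 1 : Nat) : Int) := by omega
  -- total[sz-1] = 2^sz - 2
  have hans0 : (PySem.List.pyGet? pvTotal ((n.toList.length : Int) - 1)).getD 0
      = (2:Int) ^ n.toList.length - 2 := by
    rw [hidx, PySem.List.pyGet?_natCast, pvTotal_eval, List.getElem?_map,
        List.getElem?_range (by omega : n.toList.length - 1 < 51)]
    simp only [Option.map_some, Option.getD_some]
    rw [(by omega : n.toList.length - 1 + 1 = n.toList.length)]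
  -- the loop over range(sz-1)
  have hrange : PySem.List.pyRange 0 ((n.toList.length : Int) - 1) 1
      = (List.range (n.toList.length - 1)).map (fun k : Nat => (0 : Int) + k) := by
    rw [hidx, PySem.List.pyRange_one]
    simp
  have hfold : (PySem.List.pyRange 0 ((n.toList.length : Int) - 1) 1).foldl
      (fun a i => if PySem.Str.pyGet? n i = some '7' then a + (PySem.List.pyGet? pvCnt ((n.toList.length : Int) - 1 - i)).getD 0 else a)
      ((2:Int) ^ n.toList.length - 2)
      = ((2:Int) ^ n.toList.length - 2)
        + 2 * (n.toList.dropLast).foldl (fun v c => 2 * v + (if c = '7' then 1 else 0)) 0 := by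
    rw [hrange, List.foldl_map]
    rw [PySem.List.foldl_congr_mem _ _
      (fun (a : Int) (k : Nat) => if (n.toList.dropLast)[k]? = some '7' then a + 2 ^ ((n.toList.dropLast).length - k) else a) _
      ?_]
    · have hld : (n.toList.dropLast).length = n.toList.length - 1 := by simp
      rw [← hld, loopA]
    · intro a k hk
      rw [List.mem_range] at hk
      have hget : PySem.Str.pyGet? n ((0:Int) + k) = n.toList[k]? := by
        rw [zero_add, PySem.Str.pyGet?_natCast]
      have hdrop : (n.toList.dropLast)[k]? = n.toList[k]? := by
        rw [List.getElem?_dropLast, if_pos (by omega)]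
      have hcidx : (n.toList.length : Int) - 1 - ((0:Int) + k) = ((n.toList.length - 1 - k : Nat) : Int) := by omega
      have hcnt : (PySem.List.pyGet? pvCnt ((n.toList.length : Int) - 1 - ((0:Int) + k))).getD 0
          = (2:Int) ^ (n.toList.length - 1 - k) := by
        rw [hcidx, PySem.List.pyGet?_natCast, pvCnt_eval, List.getElem?_map,
            List.getElem?_range (by omega : n.toList.length - 1 - k < 51)]
        simp only [Option.map_some, Option.getD_some]
        rw [if_neg (by omega)]
      simp only [hget, hcnt, hdrop, List.length_dropLast]
  simp only [find_position_in_series, find_position_in_series_alt, hlen, hans0, hfold]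
  by_cases h4 : PySem.Str.pyGet? n (-1) = some '4' <;> simp only [h4, if_pos, reduceIte] <;> ring

-- ===== VERDICT (by name: the statement is the Claim_ definition above) =====
theorem find_position_in_series_spec : Claim_equal_find_position_in_series := by
  intro n _ hpre
  unfold Spec_find_position_in_series
  exact find_position_in_series_spec_aux n hpre.1 hpre.2
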